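-- pv_equiv track=rewrite | github.com/yym6472/leetcode_everyday | lucup'20 team/c.py | numsGame
-- ===== SOURCE A (Python) =====
-- from typing import List
--
-- def numsGame(nums: List[int]) -> List[int]:
--     for i in range(len(nums)):
--         nums[i] -= i
--     import heapq
--     medians = []
--     min_heap = []
--     max_heap = []
--     results = []
--     for num in nums:
--         if len(max_heap) == 0:
--             heapq.heappush(max_heap, IntWrapper(num))
--             results.append(0)
--         elif len(min_heap) == len(max_heap) and num <= max_heap[0].value:
--             heapq.heappush(max_heap, IntWrapper(num))
--             results.append(medians[-1] - num)
--         elif len(min_heap) == len(max_heap) and num > max_heap[0].value: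
--             heapq.heappush(min_heap, num)
--             num_to_transfer = heapq.heappop(min_heap)
--             heapq.heappush(max_heap, IntWrapper(num_to_transfer))
--             results.append(num - max_heap[0].value)
--         elif len(min_heap) + 1 == len(max_heap) and num <= max_heap[0].value:
--             heapq.heappush(max_heap, IntWrapper(num))
--             num_to_transfer = heapq.heappop(max_heap).value
--             heapq.heappush(min_heap, num_to_transfer)
--             results.append(medians[-1] - num)
--         elif len(min_heap) + 1 == len(max_heap) and num > max_heap[0].value:
--             heapq.heappush(min_heap, num)
--             results.append(num - medians[-1])
--         medians.append(max_heap[0].value)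
--     for i in range(1, len(results)):
--         results[i] = (results[i - 1] + results[i]) % 1000000007
--     return results
--
-- class IntWrapper(object):
--     def __init__(self, value):
--         self.value = value
--     def __lt__(self, other):
--         return self.value > other.value
--     def __gt__(self, other):
--         return self.value < other.value
-- ===== SOURCE B (Python) =====
-- def numsGame(nums):
--     MOD = 1000000007
--     for i in range(len(nums)):
--         nums[i] -= i
--     sl = []
--     res = []
--     for x in nums:
--         j = 0
--         while j < len(sl) and sl[j] < x:
--             j += 1
--         sl.insert(j, x)
--         m = sl[(len(sl) - 1) // 2]
--         cost = 0
--         for v in sl: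
--             cost += abs(v - m)
--         res.append(cost % MOD)
--     return res
-- ===== Notes on version B (the rewrite author's own statement) =====
-- stated objective: simpler
-- what changed: Replaces A's two-heap running-median machinery (a max-heap/min-heap pair with rebalancing transfers, per-step incremental cost deltas and a final prefix-sum-modulo pass) by one sorted list maintained by insertion, recomputing each prefix's equalization cost directly as the sum of absolute deviations from the lower median and taking the modulus immediately.
import Mathlib
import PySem

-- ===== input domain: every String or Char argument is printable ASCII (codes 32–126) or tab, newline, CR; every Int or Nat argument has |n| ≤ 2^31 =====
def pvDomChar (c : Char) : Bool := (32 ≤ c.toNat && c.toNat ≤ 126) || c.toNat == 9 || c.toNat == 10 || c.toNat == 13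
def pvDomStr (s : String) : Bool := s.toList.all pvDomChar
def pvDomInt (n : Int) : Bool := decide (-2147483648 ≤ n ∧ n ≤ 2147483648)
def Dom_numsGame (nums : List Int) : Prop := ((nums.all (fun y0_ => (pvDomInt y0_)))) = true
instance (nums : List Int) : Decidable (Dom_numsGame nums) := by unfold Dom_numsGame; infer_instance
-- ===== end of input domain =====

-- B replaces A's two-heap running-median machinery and incremental prefix-summed costs by a
-- plain sorted list with the per-prefix equalization cost recomputed directly (objective:
-- simpler).  Both A and B mutate `nums` in place the same way (nums[i] -= i); the theorems
-- are about the return value.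

-- ===== PORT A =====
-- Skew min-heap standing in for Python's heapq list-heap: the program only observes the
-- heap through its length, its minimum (heap[0] / heappop) and its multiset of elements,
-- on which the skew heap agrees exactly with heapq.  `lt` is the element comparison
-- (IntWrapper reverses it, giving the max-heap).
inductive SkHeap where
  | nil : SkHeap
  | node : Int → SkHeap → SkHeap → SkHeap
deriving DecidableEq, Repr

def SkHeap.size : SkHeap → Nat
  | .nil => 0
  | .node _ l r => 1 + l.size + r.size

def SkHeap.merge (lt : Int → Int → Bool) : SkHeap → SkHeap → SkHeap
  | .nil, h => h
  | .node x l r, .nil => .node x l r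
  | .node x l1 r1, .node y l2 r2 =>
      if lt y x then .node y (SkHeap.merge lt (.node x l1 r1) r2) l2
      else .node x (SkHeap.merge lt r1 (.node y l2 r2)) l1
termination_by h1 h2 => h1.size + h2.size
decreasing_by all_goals simp [SkHeap.size]

def SkHeap.push (lt : Int → Int → Bool) (h : SkHeap) (x : Int) : SkHeap :=
  SkHeap.merge lt h (.node x .nil .nil)

-- heap[0]; only read on nonempty heaps (default 0 never used)
def SkHeap.top : SkHeap → Int
  | .nil => 0
  | .node v _ _ => v

-- heappop: the root is returned, the rest is the merge of the children
def SkHeap.popRest (lt : Int → Int → Bool) : SkHeap → SkHeap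
  | .nil => .nil
  | .node _ l r => SkHeap.merge lt l r

def ltMin (a b : Int) : Bool := decide (a < b)      -- int.__lt__
def ltMax (a b : Int) : Bool := decide (b < a)      -- IntWrapper.__lt__ (reversed)

-- one iteration of A's main loop; state = (medians, min_heap, max_heap, results)
def stepA (st : List Int × SkHeap × SkHeap × List Int) (num : Int) :
    List Int × SkHeap × SkHeap × List Int :=
  let medians := st.1
  let minH := st.2.1
  let maxH := st.2.2.1
  let results := st.2.2.2
  -- medians[-1]: in every branch reading it, medians ≠ [] (max_heap nonempty), default unused
  let res : SkHeap × SkHeap × List Int :=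
    if maxH.size = 0 then
      (minH, maxH.push ltMax num, results ++ [0])
    else if minH.size = maxH.size ∧ num ≤ maxH.top then
      (minH, maxH.push ltMax num, results ++ [medians.getLastD 0 - num])
    else if minH.size = maxH.size ∧ maxH.top < num then
      let minH' := minH.push ltMin num
      let t := minH'.top
      let minH'' := minH'.popRest ltMin
      let maxH' := maxH.push ltMax t
      (minH'', maxH', results ++ [num - maxH'.top])
    else if minH.size + 1 = maxH.size ∧ num ≤ maxH.top then
      let maxH' := maxH.push ltMax num
      let t := maxH'.top
      let maxH'' := maxH'.popRest ltMax
      let minH' := minH.push ltMin t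
      (minH', maxH'', results ++ [medians.getLastD 0 - num])
    else if minH.size + 1 = maxH.size ∧ maxH.top < num then
      (minH.push ltMin num, maxH, results ++ [num - medians.getLastD 0])
    else
      (minH, maxH, results)  -- unreachable: the size cases above are exhaustive
  (medians ++ [res.2.1.top], res.1, res.2.1, res.2.2)

-- for i in range(1, len(results)): results[i] = (results[i-1] + results[i]) % 1000000007
def accumMod (prev : Int) : List Int → List Int
  | [] => []
  | r :: rs =>
      let v := PySem.Int.mod (prev + r) 1000000007
      v :: accumMod v rs

def numsGame (nums : List Int) : List Int :=
  let nums := (PySem.List.enumerate nums).map (fun p => p.2 - p.1)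
  let st := nums.foldl stepA ([], .nil, .nil, [])
  let results := st.2.2.2
  match results with
  | [] => []
  | r0 :: rs => r0 :: accumMod r0 rs

-- ===== PORT B =====
-- the while-loop insertion into the sorted list: skip elements < x, insert x there
def insSorted (sl : List Int) (x : Int) : List Int :=
  match sl with
  | [] => [x]
  | y :: ys => if y < x then y :: insSorted ys x else x :: y :: ys

-- for v in sl: cost += abs(v - m)
def costFold (sl : List Int) (m : Int) : Int :=
  sl.foldl (fun c v => c + |v - m|) 0

-- one iteration of B's loop; state = (sl, res); sl is nonempty when indexed (default unused)
def stepB (st : List Int × List Int) (x : Int) : List Int × List Int :=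
  let sl := insSorted st.1 x
  let m := sl.getD ((sl.length - 1) / 2) 0
  (sl, st.2 ++ [PySem.Int.mod (costFold sl m) 1000000007])

def numsGame_alt (nums : List Int) : List Int :=
  let nums := (PySem.List.enumerate nums).map (fun p => p.2 - p.1)
  (nums.foldl stepB ([], [])).2

-- ===== PRECONDITION & SPEC =====
def Spec_numsGame (nums : List Int) (out : List Int) : Prop := out = numsGame_alt nums
instance (nums : List Int) (out : List Int) : Decidable (Spec_numsGame nums out) := by unfold Spec_numsGame; infer_instance

-- ===== CLAIM (what is proved, stated in full; the proofs are below) =====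
def Claim_equal_numsGame : Prop := ∀ (nums : List Int), Dom_numsGame nums → Spec_numsGame nums (numsGame nums)

-- ===== LEMMAS AND PROOFS =====
-- the multiset of a heap's elements, for the invariants below
def SkHeap.toList : SkHeap → List Int
  | .nil => []
  | .node v l r => v :: (l.toList ++ r.toList)

-- ===== Part I: generic skew-heap lemmas =====
theorem SkHeap.size_eq_length_toList (h : SkHeap) : h.size = h.toList.length := by
  induction h with
  | nil => simp [SkHeap.size, SkHeap.toList]
  | node v l r ihl ihr => simp [SkHeap.size, SkHeap.toList, ihl, ihr]; omega

theorem SkHeap.toList_merge_count (lt : Int → Int → Bool) (h1 h2 : SkHeap) (a : Int) :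
    (SkHeap.merge lt h1 h2).toList.count a = h1.toList.count a + h2.toList.count a := by
  induction h1, h2 using SkHeap.merge.induct lt with
  | case1 h => simp [SkHeap.merge, SkHeap.toList]
  | case2 x l r => simp [SkHeap.merge, SkHeap.toList]
  | case3 x l1 r1 y l2 r2 hlt ih =>
      rw [SkHeap.merge, if_pos hlt]
      simp only [SkHeap.toList, List.count_cons, List.count_append] at ih ⊢
      omega
  | case4 x l1 r1 y l2 r2 hlt ih =>
      rw [SkHeap.merge, if_neg hlt]
      simp only [SkHeap.toList, List.count_cons, List.count_append] at ih ⊢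
      omega

theorem SkHeap.toList_merge_perm (lt : Int → Int → Bool) (h1 h2 : SkHeap) :
    (SkHeap.merge lt h1 h2).toList.Perm (h1.toList ++ h2.toList) := by
  rw [List.perm_iff_count]
  intro a
  rw [List.count_append]
  exact SkHeap.toList_merge_count lt h1 h2 a

theorem SkHeap.toList_push_perm (lt : Int → Int → Bool) (h : SkHeap) (x : Int) :
    (SkHeap.push lt h x).toList.Perm (x :: h.toList) := by
  refine (SkHeap.toList_merge_perm lt h _).trans ?_
  simp only [SkHeap.toList, List.append_nil]
  exact (List.perm_append_comm).trans (List.Perm.refl _)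

def SkHeap.IsHeap (lt : Int → Int → Bool) : SkHeap → Prop
  | .nil => True
  | .node v l r => (∀ y ∈ l.toList, lt y v = false) ∧ (∀ y ∈ r.toList, lt y v = false) ∧
      SkHeap.IsHeap lt l ∧ SkHeap.IsHeap lt r

theorem SkHeap.isHeap_merge (lt : Int → Int → Bool)
    (Hasym : ∀ a b, lt a b = true → lt b a = false)
    (Htrans : ∀ a b c, lt b a = false → lt c b = false → lt c a = false)
    (h1 h2 : SkHeap) (H1 : h1.IsHeap lt) (H2 : h2.IsHeap lt) :
    (SkHeap.merge lt h1 h2).IsHeap lt := by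
  induction h1, h2 using SkHeap.merge.induct lt with
  | case1 h => simpa [SkHeap.merge]
  | case2 x l r => simpa [SkHeap.merge]
  | case3 x l1 r1 y l2 r2 hlt ih =>
      rw [SkHeap.merge, if_pos hlt]
      obtain ⟨hl2, hr2, Hl2, Hr2⟩ := H2
      refine ⟨?_, hl2, ih H1 Hr2, Hl2⟩
      intro z hz
      have hz' := ((SkHeap.toList_merge_perm lt (SkHeap.node x l1 r1) r2).mem_iff).mp hz
      rcases List.mem_append.mp hz' with hz1 | hz2
      · simp only [SkHeap.toList, List.mem_cons, List.mem_append] at hz1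
        have hxy : lt x y = false := Hasym _ _ hlt
        rcases hz1 with rfl | hz1 | hz1
        · exact hxy
        · exact Htrans _ _ _ hxy (H1.1 _ hz1)
        · exact Htrans _ _ _ hxy (H1.2.1 _ hz1)
      · exact hr2 _ hz2
  | case4 x l1 r1 y l2 r2 hlt ih =>
      rw [SkHeap.merge, if_neg hlt]
      obtain ⟨hl1, hr1, Hl1, Hr1⟩ := H1
      refine ⟨?_, hl1, ih Hr1 H2, Hl1⟩
      intro z hz
      have hz' := ((SkHeap.toList_merge_perm lt r1 (SkHeap.node y l2 r2)).mem_iff).mp hz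
      rcases List.mem_append.mp hz' with hz1 | hz2
      · exact hr1 _ hz1
      · simp only [SkHeap.toList, List.mem_cons, List.mem_append] at hz2
        have hyx : lt y x = false := by
          cases hyx : lt y x
          · rfl
          · exact absurd hyx (by simp [hlt])
        rcases hz2 with rfl | hz2 | hz2
        · exact hyx
        · exact Htrans _ _ _ hyx (H2.1 _ hz2)
        · exact Htrans _ _ _ hyx (H2.2.1 _ hz2)

theorem SkHeap.isHeap_push (lt : Int → Int → Bool)
    (Hasym : ∀ a b, lt a b = true → lt b a = false)
    (Htrans : ∀ a b c, lt b a = false → lt c b = false → lt c a = false)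
    (h : SkHeap) (x : Int) (H : h.IsHeap lt) : (h.push lt x).IsHeap lt := by
  refine SkHeap.isHeap_merge lt Hasym Htrans _ _ H ?_
  simp [SkHeap.IsHeap, SkHeap.toList]

theorem SkHeap.isHeap_popRest (lt : Int → Int → Bool)
    (Hasym : ∀ a b, lt a b = true → lt b a = false)
    (Htrans : ∀ a b c, lt b a = false → lt c b = false → lt c a = false)
    (h : SkHeap) (H : h.IsHeap lt) : (h.popRest lt).IsHeap lt := by
  cases h with
  | nil => simpa [SkHeap.popRest]
  | node v l r => exact SkHeap.isHeap_merge lt Hasym Htrans _ _ H.2.2.1 H.2.2.2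

theorem SkHeap.toList_node_popRest (lt : Int → Int → Bool) (v : Int) (l r : SkHeap) :
    ((SkHeap.node v l r).toList).Perm (v :: ((SkHeap.node v l r).popRest lt).toList) := by
  simp only [SkHeap.toList, SkHeap.popRest]
  exact List.Perm.cons v (SkHeap.toList_merge_perm lt l r).symm

theorem SkHeap.top_le (lt : Int → Int → Bool)
    (Hirrefl : ∀ a, lt a a = false)
    (h : SkHeap) (H : h.IsHeap lt) : ∀ y ∈ h.toList, lt y h.top = false := by
  cases h with
  | nil => simp [SkHeap.toList]
  | node v l r =>
      intro y hy
      simp only [SkHeap.toList, List.mem_cons, List.mem_append] at hy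
      rcases hy with rfl | hy | hy
      · exact Hirrefl _
      · exact H.1 _ hy
      · exact H.2.1 _ hy

theorem SkHeap.top_mem (h : SkHeap) (hne : h.toList ≠ []) : h.top ∈ h.toList := by
  cases h with
  | nil => simp [SkHeap.toList] at hne
  | node v l r => simp [SkHeap.toList, SkHeap.top]

-- ===== Part II: instantiations =====
theorem ltMin_asym : ∀ a b : Int, ltMin a b = true → ltMin b a = false := by
  intro a b; simp [ltMin]; omega
theorem ltMin_trans : ∀ a b c : Int, ltMin b a = false → ltMin c b = false → ltMin c a = false := by
  intro a b c; simp [ltMin]; omega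
theorem ltMin_irrefl : ∀ a : Int, ltMin a a = false := by intro a; simp [ltMin]
theorem ltMax_asym : ∀ a b : Int, ltMax a b = true → ltMax b a = false := by
  intro a b; simp [ltMax]; omega
theorem ltMax_trans : ∀ a b c : Int, ltMax b a = false → ltMax c b = false → ltMax c a = false := by
  intro a b c; simp [ltMax]; omega
theorem ltMax_irrefl : ∀ a : Int, ltMax a a = false := by intro a; simp [ltMax]

-- the top of a min-heap is THE minimum of any list its contents are a permutation of
theorem min_top_eq (h : SkHeap) (H : h.IsHeap ltMin) (L : List Int)
    (hp : h.toList.Perm L) (y : Int) (hy : y ∈ L) (hmin : ∀ z ∈ L, y ≤ z) : h.top = y := by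
  have hne : h.toList ≠ [] := by
    intro h0
    have hL : L = [] := List.nil_perm.mp (h0 ▸ hp)
    simp [hL] at hy
  have htm : h.top ∈ L := hp.mem_iff.mp (SkHeap.top_mem h hne)
  have h1 : h.top ≤ y := by
    have := SkHeap.top_le ltMin ltMin_irrefl h H y (hp.mem_iff.mpr hy)
    simpa [ltMin] using this
  exact le_antisymm h1 (hmin _ htm)

theorem max_top_eq (h : SkHeap) (H : h.IsHeap ltMax) (L : List Int)
    (hp : h.toList.Perm L) (y : Int) (hy : y ∈ L) (hmax : ∀ z ∈ L, z ≤ y) : h.top = y := by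
  have hne : h.toList ≠ [] := by
    intro h0
    have hL : L = [] := List.nil_perm.mp (h0 ▸ hp)
    simp [hL] at hy
  have htm : h.top ∈ L := hp.mem_iff.mp (SkHeap.top_mem h hne)
  have h1 : y ≤ h.top := by
    have := SkHeap.top_le ltMax ltMax_irrefl h H y (hp.mem_iff.mpr hy)
    simpa [ltMax] using this
  exact le_antisymm (hmax _ htm) h1

-- ===== Part III: sorted-insertion lemmas =====
def pIns (sl : List Int) (x : Int) : Nat := (sl.takeWhile (fun v => decide (v < x))).length

theorem pIns_le (sl : List Int) (x : Int) : pIns sl x ≤ sl.length := by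
  unfold pIns
  exact List.Sublist.length_le (List.takeWhile_sublist _)

theorem insSorted_eq (sl : List Int) (x : Int) :
    insSorted sl x = sl.take (pIns sl x) ++ x :: sl.drop (pIns sl x) := by
  induction sl with
  | nil => simp [insSorted, pIns]
  | cons y ys ih =>
      by_cases hy : y < x
      · simp [insSorted, pIns, hy] at ih ⊢
        exact ih
      · simp [insSorted, pIns, hy]

theorem lt_of_lt_pIns (sl : List Int) (x : Int) (i : Nat) (hi : i < pIns sl x) :
    sl.getD i 0 < x := by
  induction sl generalizing i with
  | nil => simp [pIns] at hi
  | cons y ys ih =>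
      by_cases hy : y < x
      · simp only [pIns, List.takeWhile_cons, hy, decide_true] at hi
        cases i with
        | zero => simpa using hy
        | succ j => exact ih j (by simpa [pIns] using Nat.lt_of_succ_lt_succ hi)
      · simp [pIns, hy] at hi

theorem le_getD_pIns (sl : List Int) (x : Int) (hp : pIns sl x < sl.length) :
    x ≤ sl.getD (pIns sl x) 0 := by
  induction sl with
  | nil => simp at hp
  | cons y ys ih =>
      by_cases hy : y < x
      · simp only [pIns, List.takeWhile_cons, hy, decide_true, List.length_cons] at hp ⊢
        simpa [pIns] using ih (by simpa [pIns] using Nat.lt_of_succ_lt_succ hp)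
      · simp only [pIns, List.takeWhile_cons, hy, decide_false, Bool.false_eq_true,
          if_false, List.length_nil, List.getD_cons_zero]
        omega

theorem length_insSorted (sl : List Int) (x : Int) :
    (insSorted sl x).length = sl.length + 1 := by
  rw [insSorted_eq]
  simp

theorem insSorted_perm (sl : List Int) (x : Int) : (insSorted sl x).Perm (x :: sl) := by
  induction sl with
  | nil => simp [insSorted]
  | cons y ys ih =>
      by_cases hy : y < x
      · simp only [insSorted, hy, if_pos]
        exact (ih.cons y).trans (List.Perm.swap x y ys)
      · simp [insSorted, hy]

theorem insSorted_pairwise (sl : List Int) (x : Int) (hs : sl.Pairwise (· ≤ ·)) :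
    (insSorted sl x).Pairwise (· ≤ ·) := by
  induction sl with
  | nil => simp [insSorted]
  | cons y ys ih =>
      rw [List.pairwise_cons] at hs
      by_cases hy : y < x
      · simp only [insSorted, hy, if_pos, List.pairwise_cons]
        refine ⟨?_, ih hs.2⟩
        intro z hz
        rcases List.mem_cons.mp ((insSorted_perm ys x).mem_iff.mp hz) with rfl | h
        · omega
        · exact hs.1 _ h
      · rw [insSorted, if_neg hy, List.pairwise_cons]
        refine ⟨?_, List.pairwise_cons.mpr ⟨hs.1, hs.2⟩⟩
        intro z hz
        rcases List.mem_cons.mp hz with rfl | hz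
        · omega
        · have := hs.1 _ hz; omega

theorem sorted_getD_mono (sl : List Int) (hs : sl.Pairwise (· ≤ ·)) (i j : Nat)
    (hij : i ≤ j) (hj : j < sl.length) : sl.getD i 0 ≤ sl.getD j 0 := by
  rcases Nat.eq_or_lt_of_le hij with rfl | hij'
  · exact le_refl _
  · rw [List.getD_eq_getElem _ _ (lt_trans hij' hj), List.getD_eq_getElem _ _ hj]
    exact List.pairwise_iff_getElem.mp hs i j (lt_trans hij' hj) hj hij'

theorem insSorted_getD (sl : List Int) (x : Int) (i : Nat) (hi : i ≤ sl.length) :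
    (insSorted sl x).getD i 0 =
      if i < pIns sl x then sl.getD i 0 else if i = pIns sl x then x else sl.getD (i - 1) 0 := by
  rw [insSorted_eq]
  set p := pIns sl x with hp
  have hple := pIns_le sl x
  have hlt : (sl.take p).length = p := by simp; omega
  by_cases h1 : i < p
  · rw [if_pos h1, List.getD_append _ _ _ _ (by omega)]
    rw [List.getD_eq_getElem _ _ (by omega), List.getD_eq_getElem _ _ (by omega)]
    simp [List.getElem_take]
  · rw [if_neg h1, List.getD_append_right _ _ _ _ (by omega), hlt]
    by_cases h2 : i = p
    · simp [h2]
    · rw [if_neg h2]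
      have h3 : i - p = (i - p - 1) + 1 := by omega
      rw [h3]
      simp only [List.getD_cons_succ]
      by_cases h4 : i ≤ sl.length - 1
      · rw [List.getD_eq_getElem _ _ (by simp; omega), List.getD_eq_getElem _ _ (by omega)]
        rw [List.getElem_drop]
        congr 1
        omega
      · -- i = sl.length and i - 1 = sl.length - 1 still fine; i ≤ length so i = length
        have : i = sl.length := by omega
        subst this
        rw [List.getD_eq_getElem _ _ (by simp; omega), List.getD_eq_getElem _ _ (by omega)]
        rw [List.getElem_drop]
        congr 1
        omega

-- ===== Part IIIb: take/drop/getD helpers =====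
theorem getD_mem_take (sl : List Int) (u i : Nat) (h1 : i < u) (h2 : i < sl.length) :
    sl.getD i 0 ∈ sl.take u := by
  rw [List.getD_eq_getElem _ _ h2]
  rw [List.mem_iff_getElem]
  exact ⟨i, by simpa using ⟨h1, h2⟩, by simp [List.getElem_take]⟩

theorem mem_take_exists (sl : List Int) (u : Nat) (v : Int) (hv : v ∈ sl.take u) :
    ∃ i, i < u ∧ i < sl.length ∧ sl.getD i 0 = v := by
  rw [List.mem_iff_getElem] at hv
  obtain ⟨i, hi, he⟩ := hv
  simp only [List.length_take] at hi
  refine ⟨i, by omega, by omega, ?_⟩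
  rw [List.getD_eq_getElem _ _ (by omega)]
  rw [List.getElem_take] at he
  exact he

theorem mem_drop_exists (sl : List Int) (u : Nat) (v : Int) (hv : v ∈ sl.drop u) :
    ∃ i, u ≤ i ∧ i < sl.length ∧ sl.getD i 0 = v := by
  rw [List.mem_iff_getElem] at hv
  obtain ⟨j, hj, he⟩ := hv
  simp only [List.length_drop] at hj
  refine ⟨u + j, by omega, by omega, ?_⟩
  rw [List.getD_eq_getElem _ _ (by omega)]
  rw [List.getElem_drop] at he
  exact he

theorem take_succ_getD (sl : List Int) (i : Nat) (h : i < sl.length) :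
    sl.take (i+1) = sl.take i ++ [sl.getD i 0] := by
  rw [List.getD_eq_getElem _ _ h]
  exact List.take_succ_eq_append_getElem h

theorem drop_getD_cons (sl : List Int) (i : Nat) (h : i < sl.length) :
    sl.drop i = sl.getD i 0 :: sl.drop (i+1) := by
  rw [List.getD_eq_getElem _ _ h]
  exact List.drop_eq_getElem_cons h

-- inserting below the split point u: new lower half gains x, upper half is unchanged
theorem ins_take_le (sl : List Int) (x : Int) (u : Nat) (hpu : pIns sl x ≤ u) (_hu : u ≤ sl.length) :
    (insSorted sl x).take (u+1) = sl.take (pIns sl x) ++ x :: (sl.drop (pIns sl x)).take (u - pIns sl x) := by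
  rw [insSorted_eq]
  set p := pIns sl x with hp
  have hple := pIns_le sl x
  have hlt : (sl.take p).length = p := by simp; omega
  rw [List.take_append, hlt]
  have h1 : (sl.take p).take (u+1) = sl.take p := by
    rw [List.take_take]
    congr 1
    omega
  rw [h1]
  have h2 : u + 1 - p = (u - p) + 1 := by omega
  rw [h2, List.take_succ_cons]

theorem ins_take_le_perm (sl : List Int) (x : Int) (u : Nat) (hpu : pIns sl x ≤ u) (hu : u ≤ sl.length) :
    ((insSorted sl x).take (u+1)).Perm (x :: sl.take u) := by
  rw [ins_take_le sl x u hpu hu]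
  refine (List.perm_middle).trans ?_
  refine List.Perm.cons x ?_
  have : u = pIns sl x + (u - pIns sl x) := by omega
  conv_rhs => rw [this, List.take_add]

theorem ins_drop_le (sl : List Int) (x : Int) (u : Nat) (hpu : pIns sl x ≤ u) (_hu : u ≤ sl.length) :
    (insSorted sl x).drop (u+1) = sl.drop u := by
  rw [insSorted_eq]
  set p := pIns sl x with hp
  have hple := pIns_le sl x
  have hlt : (sl.take p).length = p := by simp; omega
  rw [List.drop_append, hlt]
  have h1 : (sl.take p).drop (u+1) = [] := by
    apply List.drop_eq_nil_of_le
    omega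
  rw [h1, List.nil_append]
  have h2 : u + 1 - p = (u - p) + 1 := by omega
  rw [h2, List.drop_succ_cons, List.drop_drop]
  congr 1
  omega

-- inserting at or above the split point u: lower half keeps its elements, upper half gains x
theorem ins_take_ge (sl : List Int) (x : Int) (u : Nat) (hup : u ≤ pIns sl x) :
    (insSorted sl x).take u = sl.take u := by
  rw [insSorted_eq]
  have hple := pIns_le sl x
  have hlt : (sl.take (pIns sl x)).length = pIns sl x := by simp; omega
  rw [List.take_append_of_le_length (by omega)]
  rw [List.take_take]
  congr 1
  omega

theorem ins_take_ge_perm (sl : List Int) (x : Int) (u : Nat) (hup : u ≤ pIns sl x)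
    (_hu : u ≤ sl.length) :
    ((insSorted sl x).take (u+1)).Perm ((insSorted sl x).getD u 0 :: sl.take u) := by
  have hlen : (insSorted sl x).length = sl.length + 1 := length_insSorted sl x
  rw [take_succ_getD _ _ (by omega), ins_take_ge sl x u hup]
  exact List.perm_append_singleton _ _

theorem ins_drop_ge_perm (sl : List Int) (x : Int) (u : Nat) (hup : u ≤ pIns sl x)
    (_hu : u ≤ sl.length) :
    ((insSorted sl x).getD u 0 :: (insSorted sl x).drop (u+1)).Perm (x :: sl.drop u) := by
  have hlen : (insSorted sl x).length = sl.length + 1 := length_insSorted sl x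
  have hsplit : (insSorted sl x).take u ++ ((insSorted sl x).getD u 0 :: (insSorted sl x).drop (u+1)) = insSorted sl x := by
    rw [← drop_getD_cons _ _ (by omega)]
    exact List.take_append_drop u _
  have hperm : ((insSorted sl x).take u ++ ((insSorted sl x).getD u 0 :: (insSorted sl x).drop (u+1))).Perm
      (sl.take u ++ (x :: sl.drop u)) := by
    rw [hsplit]
    refine (insSorted_perm sl x).trans ?_
    have h0 : (sl.take u ++ x :: sl.drop u).Perm (x :: (sl.take u ++ sl.drop u)) := List.perm_middle
    rw [List.take_append_drop] at h0
    exact h0.symm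
  rw [ins_take_ge sl x u hup] at hperm
  exact (List.perm_append_left_iff _).mp hperm

-- ===== Part IV: cost lemmas =====
theorem costFold_eq_sum (sl : List Int) (m : Int) :
    costFold sl m = (sl.map (fun v => |v - m|)).sum := by
  unfold costFold
  rw [PySem.List.foldl_add]
  simp

theorem sum_map_abs_le (L : List Int) (c : Int) (hL : ∀ v ∈ L, v ≤ c) :
    (L.map (fun v => |v - c|)).sum = (L.length : Int) * c - L.sum := by
  induction L with
  | nil => simp
  | cons y ys ih =>
      have hy := hL y (by simp)
      have h1 : |y - c| = c - y := by rw [abs_of_nonpos (by omega)]; omega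
      simp only [List.map_cons, List.sum_cons, List.length_cons, h1,
        ih (fun v hv => hL v (by simp [hv]))]
      push_cast
      ring

theorem sum_map_abs_ge (R : List Int) (c : Int) (hR : ∀ v ∈ R, c ≤ v) :
    (R.map (fun v => |v - c|)).sum = R.sum - (R.length : Int) * c := by
  induction R with
  | nil => simp
  | cons y ys ih =>
      have hy := hR y (by simp)
      have h1 : |y - c| = y - c := by rw [abs_of_nonneg (by omega)]
      simp only [List.map_cons, List.sum_cons, List.length_cons, h1,
        ih (fun v hv => hR v (by simp [hv]))]
      push_cast
      ring

theorem cost_split (L R : List Int) (c : Int) (hL : ∀ v ∈ L, v ≤ c) (hR : ∀ v ∈ R, c ≤ v)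
    (hlen : L.length = R.length) :
    (((L ++ R).map (fun v => |v - c|)).sum) = R.sum - L.sum := by
  rw [List.map_append, List.sum_append, sum_map_abs_le L c hL, sum_map_abs_ge R c hR, hlen]
  ring

-- for an even-length middle range the cost does not depend on the chosen pivot
theorem cost_between (sl : List Int) (hs : sl.Pairwise (· ≤ ·)) (hK : 1 ≤ sl.length) (c : Int)
    (h1 : sl.getD ((sl.length - 1) / 2) 0 ≤ c) (h2 : c ≤ sl.getD (sl.length / 2) 0) :
    (sl.map (fun v => |v - c|)).sum = (sl.map (fun v => |v - sl.getD ((sl.length - 1) / 2) 0|)).sum := by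
  set K := sl.length with hKdef
  set h := (K - 1) / 2 with hh
  set m := sl.getD h 0 with hm
  by_cases hpar : K % 2 = 1
  · have : K / 2 = h := by omega
    rw [this] at h2
    have : c = m := le_antisymm h2 h1
    rw [this]
  · -- K even
    set u := K / 2 with hu
    have hu1 : u + u = K := by omega
    have hlt : (sl.take u).length = u := by simp; omega
    have hld : (sl.drop u).length = u := by simp; omega
    have hmemt : ∀ v ∈ sl.take u, v ≤ c ∧ v ≤ m := by
      intro v hv
      obtain ⟨i, hiu, hiK, he⟩ := mem_take_exists sl u v hv
      have : sl.getD i 0 ≤ m := sorted_getD_mono sl hs i h (by omega) (by omega)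
      constructor <;> omega
    have hmemd : ∀ v ∈ sl.drop u, c ≤ v ∧ m ≤ v := by
      intro v hv
      obtain ⟨i, hiu, hiK, he⟩ := mem_drop_exists sl u v hv
      have hx1 : sl.getD u 0 ≤ sl.getD i 0 := sorted_getD_mono sl hs u i hiu hiK
      have hx2 : m ≤ sl.getD u 0 := sorted_getD_mono sl hs h u (by omega) (by omega)
      constructor <;> omega
    have e1 : (sl.map (fun v => |v - c|)).sum = (sl.drop u).sum - (sl.take u).sum := by
      conv_lhs => rw [← List.take_append_drop u sl]
      exact cost_split _ _ c (fun v hv => (hmemt v hv).1) (fun v hv => (hmemd v hv).1) (by omega)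
    have e2 : (sl.map (fun v => |v - m|)).sum = (sl.drop u).sum - (sl.take u).sum := by
      conv_lhs => rw [← List.take_append_drop u sl]
      exact cost_split _ _ m (fun v hv => (hmemt v hv).2) (fun v hv => (hmemd v hv).2) (by omega)
    rw [e1, e2]

-- ===== Part V: the per-step cost identity and the final modular pass =====
theorem take_le_bound (sl : List Int) (hs : sl.Pairwise (· ≤ ·)) (u : Nat) (hu : u < sl.length) :
    ∀ z ∈ sl.take (u+1), z ≤ sl.getD u 0 := by
  intro z hz
  obtain ⟨i, hiu, hiK, he⟩ := mem_take_exists sl (u+1) z hz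
  have := sorted_getD_mono sl hs i u (by omega) hu
  omega

theorem cost_step (sl : List Int) (x : Int) (hs : sl.Pairwise (· ≤ ·)) (hK : 1 ≤ sl.length) :
    ((insSorted sl x).map (fun v => |v - (insSorted sl x).getD (sl.length / 2) 0|)).sum =
      (sl.map (fun v => |v - sl.getD ((sl.length - 1) / 2) 0|)).sum +
      |x - (if x ≤ sl.getD ((sl.length - 1) / 2) 0 then sl.getD ((sl.length - 1) / 2) 0
            else (insSorted sl x).getD (sl.length / 2) 0)| := by
  set K := sl.length with hKdef
  set h := (K - 1) / 2 with hh
  set m := sl.getD h 0 with hm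
  set sl' := insSorted sl x with hsl'
  set m' := sl'.getD (K / 2) 0 with hm'
  set c := if x ≤ m then m else m' with hc
  have hs' : sl'.Pairwise (· ≤ ·) := insSorted_pairwise sl x hs
  have hlen' : sl'.length = K + 1 := length_insSorted sl x
  have hple := pIns_le sl x
  set p := pIns sl x with hp
  -- the pivot c lies between the middle elements of sl and of sl'
  have hF1 : sl.getD h 0 ≤ c ∧ c ≤ sl.getD (K / 2) 0 := by
    by_cases hxm : x ≤ m
    · rw [hc, if_pos hxm]
      exact ⟨le_refl _, sorted_getD_mono sl hs h (K/2) (by omega) (by omega)⟩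
    · rw [hc, if_neg hxm]
      have hhp : h + 1 ≤ p := by
        by_contra hcon
        have hpK : p < K := by omega
        have h1 := le_getD_pIns sl x hpK
        rw [← hp] at h1
        have h2 := sorted_getD_mono sl hs p h (by omega) (by omega)
        omega
      have hval := insSorted_getD sl x (K/2) (by omega)
      rw [← hsl', ← hm'] at hval
      by_cases hcase : K/2 < p
      · rw [if_pos hcase] at hval
        constructor
        · rw [hval]; exact sorted_getD_mono sl hs h (K/2) (by omega) (by omega)
        · rw [hval]
      · have hcase2 : K/2 = p := by omega
        rw [if_neg hcase, if_pos hcase2] at hval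
        constructor
        · rw [hval]; omega
        · rw [hval, hcase2]; exact le_getD_pIns sl x (by omega)
  have hF2 : sl'.getD (K / 2) 0 ≤ c ∧ c ≤ sl'.getD ((K+1) / 2) 0 := by
    by_cases hxm : x ≤ m
    · rw [hc, if_pos hxm]
      have hhp : p ≤ h := by
        by_contra hcon
        have := lt_of_lt_pIns sl x h (by omega)
        omega
      constructor
      · have hval := insSorted_getD sl x (K/2) (by omega)
        rw [← hsl'] at hval
        by_cases hcase : K/2 < p
        · omega
        · by_cases hcase2 : K/2 = p
          · rw [if_neg hcase, if_pos hcase2] at hval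
            rw [hval]; exact hxm
          · rw [if_neg hcase, if_neg hcase2] at hval
            rw [hval]
            exact sorted_getD_mono sl hs (K/2 - 1) h (by omega) (by omega)
      · have hval := insSorted_getD sl x ((K+1)/2) (by omega)
        rw [← hsl'] at hval
        rw [if_neg (by omega), if_neg (by omega)] at hval
        rw [hval]
        have : (K+1)/2 - 1 = h := by omega
        rw [this]
    · rw [hc, if_neg hxm]
      exact ⟨le_refl _, sorted_getD_mono sl' hs' (K/2) ((K+1)/2) (by omega) (by omega)⟩
  have A1 : (sl'.map (fun v => |v - c|)).sum = (sl'.map (fun v => |v - sl'.getD ((sl'.length - 1) / 2) 0|)).sum := by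
    refine cost_between sl' hs' (by omega) c ?_ ?_
    · rw [show (sl'.length - 1) / 2 = K / 2 by omega]; exact hF2.1
    · rw [show sl'.length / 2 = (K+1) / 2 by omega]; exact hF2.2
  have A2 : (sl'.map (fun v => |v - c|)).sum = |x - c| + (sl.map (fun v => |v - c|)).sum := by
    have := ((insSorted_perm sl x).map (fun v => |v - c|)).sum_eq
    rw [this]
    simp
  have A3 : (sl.map (fun v => |v - c|)).sum = (sl.map (fun v => |v - m|)).sum :=
    cost_between sl hs hK c hF1.1 hF1.2
  have hidx : (sl'.length - 1) / 2 = K / 2 := by omega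
  rw [hidx] at A1
  rw [← A1, A2, A3]
  ring

theorem accumMod_append (prev : Int) (rs : List Int) (d : Int) :
    accumMod prev (rs ++ [d]) =
      accumMod prev rs ++ [PySem.Int.mod ((accumMod prev rs).getLastD prev + d) 1000000007] := by
  induction rs generalizing prev with
  | nil => simp [accumMod]
  | cons r rs ih =>
      simp only [List.cons_append, accumMod]
      rw [ih, List.getLastD_cons]

theorem mod_add_mod_left (a d : Int) :
    PySem.Int.mod (PySem.Int.mod a 1000000007 + d) 1000000007 = PySem.Int.mod (a + d) 1000000007 := by
  simp only [PySem.Int.mod_eq_emod_of_pos (show (0:Int) < 1000000007 by norm_num)]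
  omega

-- ===== Part VI: the invariant tying A's heaps to B's sorted list =====
def stateA (xs : List Int) : List Int × SkHeap × SkHeap × List Int :=
  xs.foldl stepA ([], SkHeap.nil, SkHeap.nil, [])

def stateB (xs : List Int) : List Int × List Int :=
  xs.foldl stepB ([], [])

def finishRes : List Int → List Int
  | [] => []
  | r0 :: rs => r0 :: accumMod r0 rs

theorem finishRes_append (r0 : Int) (rs : List Int) (d : Int) :
    finishRes ((r0 :: rs) ++ [d]) =
      finishRes (r0 :: rs) ++ [PySem.Int.mod ((finishRes (r0 :: rs)).getLastD 0 + d) 1000000007] := by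
  simp only [List.cons_append, finishRes]
  rw [accumMod_append, List.getLastD_cons]

theorem toList_popRest_perm (lt : Int → Int → Bool) (hp : SkHeap) (hne : hp.toList ≠ []) :
    hp.toList.Perm (hp.top :: (hp.popRest lt).toList) := by
  cases hp with
  | nil => simp [SkHeap.toList] at hne
  | node v l r => exact SkHeap.toList_node_popRest lt v l r

def InvAB (xs : List Int) : Prop :=
  ((stateB xs).1).Pairwise (· ≤ ·) ∧
  ((stateB xs).1).length = xs.length ∧
  ((stateA xs).2.2.1.toList).Perm (((stateB xs).1).take ((xs.length - 1) / 2 + 1)) ∧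
  ((stateA xs).2.1.toList).Perm (((stateB xs).1).drop ((xs.length - 1) / 2 + 1)) ∧
  (stateA xs).2.2.1.IsHeap ltMax ∧
  (stateA xs).2.1.IsHeap ltMin ∧
  ((stateA xs).1).getLastD 0 = ((stateB xs).1).getD ((xs.length - 1) / 2) 0 ∧
  ((stateA xs).2.2.2).sum = (((stateB xs).1).map (fun v => |v - ((stateB xs).1).getD ((xs.length - 1) / 2) 0|)).sum ∧
  finishRes ((stateA xs).2.2.2) = (stateB xs).2 ∧
  ((stateB xs).2).getLastD 0 = PySem.Int.mod ((stateA xs).2.2.2).sum 1000000007 ∧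
  (stateA xs).2.2.2 ≠ []

theorem invAB_build (xs : List Int) (med' : List Int) (minH' maxH' : SkHeap) (res' : List Int)
    (sl' resB' : List Int)
    (hA : stateA xs = (med', minH', maxH', res')) (hB : stateB xs = (sl', resB'))
    (c1 : sl'.Pairwise (· ≤ ·)) (c2 : sl'.length = xs.length)
    (c3 : maxH'.toList.Perm (sl'.take ((xs.length - 1) / 2 + 1)))
    (c4 : minH'.toList.Perm (sl'.drop ((xs.length - 1) / 2 + 1)))
    (c5 : maxH'.IsHeap ltMax) (c6 : minH'.IsHeap ltMin)
    (c7 : med'.getLastD 0 = sl'.getD ((xs.length - 1) / 2) 0)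
    (c8 : res'.sum = (sl'.map (fun v => |v - sl'.getD ((xs.length - 1) / 2) 0|)).sum)
    (c9 : finishRes res' = resB')
    (c10 : resB'.getLastD 0 = PySem.Int.mod res'.sum 1000000007)
    (c11 : res' ≠ []) : InvAB xs := by
  unfold InvAB
  rw [hA, hB]
  exact ⟨c1, c2, c3, c4, c5, c6, c7, c8, c9, c10, c11⟩

theorem invAB_single (y : Int) : InvAB [y] := by
  have hA : stateA [y] = ([y], SkHeap.nil, SkHeap.node y .nil .nil, [0]) := by
    simp [stateA, stepA, SkHeap.size, SkHeap.push, SkHeap.merge, SkHeap.top]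
  have hB : stateB [y] = ([y], [0]) := by
    simp [stateB, stepB, insSorted, costFold]
  refine invAB_build [y] _ _ _ _ _ _ hA hB ?_ ?_ ?_ ?_ ?_ ?_ ?_ ?_ ?_ ?_ ?_
  · simp
  · simp
  · simp [SkHeap.toList]
  · simp [SkHeap.toList]
  · simp [SkHeap.IsHeap, SkHeap.toList]
  · simp [SkHeap.IsHeap]
  · simp
  · simp
  · simp [finishRes, accumMod]
  · simp
  · simp

-- the three result-side components follow uniformly from one value identity
theorem tail_components (sl' res resB : List Int) (d m2 : Int)
    (hfin : finishRes res = resB) (hresne : res ≠ [])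
    (hlast : resB.getLastD 0 = PySem.Int.mod res.sum 1000000007)
    (hval : res.sum + d = costFold sl' m2) :
    (res ++ [d]).sum = (sl'.map (fun v => |v - m2|)).sum ∧
    finishRes (res ++ [d]) = resB ++ [PySem.Int.mod (costFold sl' m2) 1000000007] ∧
    (resB ++ [PySem.Int.mod (costFold sl' m2) 1000000007]).getLastD 0 =
      PySem.Int.mod ((res ++ [d]).sum) 1000000007 ∧
    (res ++ [d]) ≠ [] := by
  have hsum' : (res ++ [d]).sum = res.sum + d := by simp
  refine ⟨?_, ?_, ?_, by simp⟩
  · rw [hsum', hval, costFold_eq_sum]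
  · rcases res with _ | ⟨r0, rs⟩
    · simp at hresne
    · rw [finishRes_append, hfin, hlast, mod_add_mod_left, ← hval]
  · rw [List.getLastD_concat, hsum', ← hval]

theorem invAB_step (ys : List Int) (x : Int) (hne : ys ≠ []) (IH : InvAB ys) :
    InvAB (ys ++ [x]) := by
  obtain ⟨hsort, hlen, hmaxp, hminp, hmaxH, hminH, hmed, hsum, hfin, hlast, hresne⟩ := IH
  rcases hA : stateA ys with ⟨med, minH, maxH, res⟩
  rcases hB : stateB ys with ⟨sl, resB⟩
  simp only [hA, hB] at hsort hlen hmaxp hminp hmaxH hminH hmed hsum hfin hlast hresne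
  have hKpos : 1 ≤ ys.length := List.length_pos_of_ne_nil hne
  have hstA : stateA (ys ++ [x]) = stepA (stateA ys) x := by
    simp [stateA, List.foldl_append]
  rw [hA] at hstA
  have hstB : stateB (ys ++ [x]) = stepB (stateB ys) x := by
    simp [stateB, List.foldl_append]
  rw [hB] at hstB
  have hslen : sl.length = ys.length := hlen
  have hmaxsize : maxH.size = (ys.length - 1) / 2 + 1 := by
    rw [SkHeap.size_eq_length_toList, hmaxp.length_eq, List.length_take]
    omega
  have hminsize : minH.size = ys.length - ((ys.length - 1) / 2 + 1) := by
    rw [SkHeap.size_eq_length_toList, hminp.length_eq, List.length_drop]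
    omega
  have htopmax : maxH.top = sl.getD ((ys.length - 1) / 2) 0 := by
    refine max_top_eq maxH hmaxH _ hmaxp _
      (getD_mem_take sl ((ys.length - 1) / 2 + 1) ((ys.length - 1) / 2) (by omega) (by omega)) ?_
    exact take_le_bound sl hsort _ (by omega)
  have hs' : (insSorted sl x).Pairwise (· ≤ ·) := insSorted_pairwise sl x hsort
  have hlen' : (insSorted sl x).length = ys.length + 1 := by rw [length_insSorted, hslen]
  have hple := pIns_le sl x
  have hcost := cost_step sl x hsort (by omega)
  rw [hslen] at hcost
  have hxlen : (ys ++ [x]).length = ys.length + 1 := by simp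
  have hB' : stateB (ys ++ [x]) = (insSorted sl x,
      resB ++ [PySem.Int.mod (costFold (insSorted sl x)
        ((insSorted sl x).getD (ys.length / 2) 0)) 1000000007]) := by
    rw [hstB]
    simp only [stepB, hlen', Nat.add_sub_cancel]
  have hmed_top : ∀ (H' : SkHeap), H'.IsHeap ltMax →
      H'.toList.Perm ((insSorted sl x).take (ys.length / 2 + 1)) →
      H'.top = (insSorted sl x).getD (ys.length / 2) 0 := by
    intro H' hH hperm
    refine max_top_eq H' hH _ hperm _
      (getD_mem_take _ (ys.length / 2 + 1) (ys.length / 2) (by omega) (by omega)) ?_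
    exact take_le_bound _ hs' _ (by omega)
  have hc0 : ¬(maxH.size = 0) := by omega
  by_cases hxm : x ≤ sl.getD ((ys.length - 1) / 2) 0
  · -- x goes to the lower half
    have hppos : pIns sl x ≤ (ys.length - 1) / 2 := by
      by_contra hcon
      have := lt_of_lt_pIns sl x ((ys.length - 1) / 2) (by omega)
      omega
    rw [if_pos hxm] at hcost
    have habs : |x - sl.getD ((ys.length - 1) / 2) 0| = sl.getD ((ys.length - 1) / 2) 0 - x := by
      rw [abs_of_nonpos (by omega)]
      ring
    by_cases hpar : ys.length % 2 = 0
    · -- even length: push onto the max-heap (A's branch 2)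
      have huK : (ys.length - 1) / 2 + 1 = ys.length / 2 := by omega
      have hc2 : minH.size = maxH.size ∧ x ≤ maxH.top := ⟨by omega, by rw [htopmax]; exact hxm⟩
      have hA' : stepA (med, minH, maxH, res) x =
          (med ++ [(maxH.push ltMax x).top], minH, maxH.push ltMax x,
            res ++ [med.getLastD 0 - x]) := by
        simp only [stepA]
        rw [if_neg hc0, if_pos hc2]
      rw [huK] at hmaxp hminp
      have h3 : (maxH.push ltMax x).toList.Perm ((insSorted sl x).take (ys.length / 2 + 1)) :=
        ((SkHeap.toList_push_perm ltMax maxH x).trans (hmaxp.cons x)).trans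
          (ins_take_le_perm sl x (ys.length / 2) (by omega) (by omega)).symm
      have h5 : (maxH.push ltMax x).IsHeap ltMax :=
        SkHeap.isHeap_push ltMax ltMax_asym ltMax_trans maxH x hmaxH
      have hval : res.sum + (med.getLastD 0 - x) =
          costFold (insSorted sl x) ((insSorted sl x).getD (ys.length / 2) 0) := by
        rw [costFold_eq_sum, hmed]
        omega
      obtain ⟨c8, c9, c10, c11⟩ := tail_components _ _ _ _ _ hfin hresne hlast hval
      refine invAB_build (ys ++ [x]) _ _ _ _ _ _ (hstA.trans hA') hB' hs'
        (by rw [hlen', hxlen]) ?_ ?_ h5 hminH ?_ ?_ c9 c10 c11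
      · rw [hxlen, Nat.add_sub_cancel]
        exact h3
      · rw [hxlen, Nat.add_sub_cancel]
        rw [ins_drop_le sl x (ys.length / 2) (by omega) (by omega)]
        exact hminp
      · rw [hxlen, Nat.add_sub_cancel, List.getLastD_concat]
        exact hmed_top _ h5 h3
      · rw [hxlen, Nat.add_sub_cancel]
        exact c8
    · -- odd length: push then transfer the max (A's branch 4)
      have huK : ys.length / 2 = (ys.length - 1) / 2 := by omega
      have hc2' : ¬(minH.size = maxH.size ∧ x ≤ maxH.top) := by
        rintro ⟨a, -⟩; omega
      have hc3' : ¬(minH.size = maxH.size ∧ maxH.top < x) := by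
        rintro ⟨a, -⟩; omega
      have hc4 : minH.size + 1 = maxH.size ∧ x ≤ maxH.top := ⟨by omega, by rw [htopmax]; exact hxm⟩
      have hA' : stepA (med, minH, maxH, res) x =
          (med ++ [((maxH.push ltMax x).popRest ltMax).top],
            minH.push ltMin ((maxH.push ltMax x).top),
            (maxH.push ltMax x).popRest ltMax,
            res ++ [med.getLastD 0 - x]) := by
        simp only [stepA]
        rw [if_neg hc0, if_neg hc2', if_neg hc3', if_pos hc4]
      have hpermPush : (maxH.push ltMax x).toList.Perm (x :: sl.take ((ys.length - 1) / 2 + 1)) :=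
        (SkHeap.toList_push_perm ltMax maxH x).trans (hmaxp.cons x)
      have hpushHeap : (maxH.push ltMax x).IsHeap ltMax :=
        SkHeap.isHeap_push ltMax ltMax_asym ltMax_trans maxH x hmaxH
      have htpush : (maxH.push ltMax x).top = sl.getD ((ys.length - 1) / 2) 0 := by
        refine max_top_eq _ hpushHeap _ hpermPush _
          (List.mem_cons_of_mem _
            (getD_mem_take sl ((ys.length - 1) / 2 + 1) ((ys.length - 1) / 2) (by omega) (by omega))) ?_
        intro z hz
        rcases List.mem_cons.mp hz with rfl | hz
        · exact hxm
        · exact take_le_bound sl hsort _ (by omega) z hz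
      have hpushne : (maxH.push ltMax x).toList ≠ [] := by
        intro h0
        have := hpermPush.length_eq
        rw [h0] at this
        simp at this
      have hpopperm := toList_popRest_perm ltMax (maxH.push ltMax x) hpushne
      rw [htpush] at hpopperm
      have hmid : sl.take ((ys.length - 1) / 2 + 1) =
          sl.take ((ys.length - 1) / 2) ++ [sl.getD ((ys.length - 1) / 2) 0] :=
        take_succ_getD sl _ (by omega)
      have hxm' : (x :: sl.take ((ys.length - 1) / 2 + 1)).Perm
          (sl.getD ((ys.length - 1) / 2) 0 :: x :: sl.take ((ys.length - 1) / 2)) := by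
        rw [hmid]
        refine (List.Perm.cons x (List.perm_append_singleton _ _)).trans ?_
        exact List.Perm.swap _ _ _
      have hpoplist : ((maxH.push ltMax x).popRest ltMax).toList.Perm
          (x :: sl.take ((ys.length - 1) / 2)) :=
        (hpermPush.symm.trans hpopperm).symm.trans hxm' |>.cons_inv
      have h3 : ((maxH.push ltMax x).popRest ltMax).toList.Perm
          ((insSorted sl x).take (ys.length / 2 + 1)) := by
        rw [huK]
        exact hpoplist.trans (ins_take_le_perm sl x ((ys.length - 1) / 2) hppos (by omega)).symm
      have h5 : ((maxH.push ltMax x).popRest ltMax).IsHeap ltMax :=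
        SkHeap.isHeap_popRest ltMax ltMax_asym ltMax_trans _ hpushHeap
      have hval : res.sum + (med.getLastD 0 - x) =
          costFold (insSorted sl x) ((insSorted sl x).getD (ys.length / 2) 0) := by
        rw [costFold_eq_sum, hmed]
        omega
      obtain ⟨c8, c9, c10, c11⟩ := tail_components _ _ _ _ _ hfin hresne hlast hval
      refine invAB_build (ys ++ [x]) _ _ _ _ _ _ (hstA.trans hA') hB' hs'
        (by rw [hlen', hxlen]) ?_ ?_ h5 ?_ ?_ ?_ c9 c10 c11
      · rw [hxlen, Nat.add_sub_cancel]
        exact h3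
      · rw [hxlen, Nat.add_sub_cancel, htpush, huK]
        rw [ins_drop_le sl x ((ys.length - 1) / 2) hppos (by omega),
          drop_getD_cons sl ((ys.length - 1) / 2) (by omega)]
        exact (SkHeap.toList_push_perm ltMin minH _).trans (hminp.cons _)
      · exact SkHeap.isHeap_push ltMin ltMin_asym ltMin_trans _ _ hminH
      · rw [hxlen, Nat.add_sub_cancel, List.getLastD_concat]
        exact hmed_top _ h5 h3
      · rw [hxlen, Nat.add_sub_cancel]
        exact c8
  · -- x goes to the upper half
    have hm : sl.getD ((ys.length - 1) / 2) 0 < x := by omega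
    have hp2 : (ys.length - 1) / 2 + 1 ≤ pIns sl x := by
      by_contra hcon
      have h1 := le_getD_pIns sl x (by omega)
      have h2 := sorted_getD_mono sl hsort (pIns sl x) ((ys.length - 1) / 2) (by omega) (by omega)
      omega
    rw [if_neg hxm] at hcost
    have hxval : (insSorted sl x).getD (pIns sl x) 0 = x := by
      rw [insSorted_getD sl x (pIns sl x) hple]
      simp
    have hm'x : (insSorted sl x).getD (ys.length / 2) 0 ≤ x := by
      have hmono := sorted_getD_mono _ hs' (ys.length / 2) (pIns sl x) (by omega) (by omega)
      rw [hxval] at hmono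
      exact hmono
    have habs : |x - (insSorted sl x).getD (ys.length / 2) 0| =
        x - (insSorted sl x).getD (ys.length / 2) 0 := abs_of_nonneg (by omega)
    have hmlem' : sl.getD ((ys.length - 1) / 2) 0 ≤ (insSorted sl x).getD (ys.length / 2) 0 := by
      by_cases hcase : ys.length / 2 < pIns sl x
      · have : (insSorted sl x).getD (ys.length / 2) 0 = sl.getD (ys.length / 2) 0 := by
          rw [insSorted_getD sl x (ys.length / 2) (by omega), if_pos hcase]
        rw [this]
        exact sorted_getD_mono sl hsort ((ys.length - 1) / 2) (ys.length / 2) (by omega) (by omega)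
      · have hcase2 : ys.length / 2 = pIns sl x := by omega
        rw [hcase2, hxval]
        omega
    by_cases hpar : ys.length % 2 = 0
    · -- even length: push onto the min-heap, transfer its min (A's branch 3)
      have huK : (ys.length - 1) / 2 + 1 = ys.length / 2 := by omega
      have hc2' : ¬(minH.size = maxH.size ∧ x ≤ maxH.top) := by
        rintro ⟨-, b⟩
        rw [htopmax] at b
        omega
      have hc3 : minH.size = maxH.size ∧ maxH.top < x := ⟨by omega, by rw [htopmax]; omega⟩
      have hA' : stepA (med, minH, maxH, res) x =
          (med ++ [(maxH.push ltMax ((minH.push ltMin x).top)).top],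
            (minH.push ltMin x).popRest ltMin,
            maxH.push ltMax ((minH.push ltMin x).top),
            res ++ [x - (maxH.push ltMax ((minH.push ltMin x).top)).top]) := by
        simp only [stepA]
        rw [if_neg hc0, if_neg hc2', if_pos hc3]
      rw [huK] at hmaxp hminp
      have hpermMin1 : (minH.push ltMin x).toList.Perm (x :: sl.drop (ys.length / 2)) :=
        (SkHeap.toList_push_perm ltMin minH x).trans (hminp.cons x)
      have hminPushHeap : (minH.push ltMin x).IsHeap ltMin :=
        SkHeap.isHeap_push ltMin ltMin_asym ltMin_trans minH x hminH
      have hdrop := ins_drop_ge_perm sl x (ys.length / 2) (by omega) (by omega)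
      have hm'mem : (insSorted sl x).getD (ys.length / 2) 0 ∈ x :: sl.drop (ys.length / 2) :=
        hdrop.mem_iff.mp (List.mem_cons_self ..)
      have hm'low : ∀ z ∈ x :: sl.drop (ys.length / 2),
          (insSorted sl x).getD (ys.length / 2) 0 ≤ z := by
        intro z hz
        rcases List.mem_cons.mp hz with rfl | hz
        · exact hm'x
        · obtain ⟨i, hi1, hi2, he⟩ := mem_drop_exists sl (ys.length / 2) z hz
          by_cases hip : i < pIns sl x
          · have hv : (insSorted sl x).getD i 0 = sl.getD i 0 := by
              rw [insSorted_getD sl x i (by omega), if_pos hip]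
            rw [← he, ← hv]
            exact sorted_getD_mono _ hs' (ys.length / 2) i (by omega) (by omega)
          · have hv : (insSorted sl x).getD (i + 1) 0 = sl.getD i 0 := by
              rw [insSorted_getD sl x (i + 1) (by omega), if_neg (by omega), if_neg (by omega)]
              simp
            rw [← he, ← hv]
            exact sorted_getD_mono _ hs' (ys.length / 2) (i + 1) (by omega) (by omega)
      have ht : (minH.push ltMin x).top = (insSorted sl x).getD (ys.length / 2) 0 :=
        min_top_eq _ hminPushHeap _ hpermMin1 _ hm'mem hm'low
      have hminne : (minH.push ltMin x).toList ≠ [] := by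
        intro h0
        have := hpermMin1.length_eq
        rw [h0] at this
        simp at this
      have hpopperm := toList_popRest_perm ltMin (minH.push ltMin x) hminne
      rw [ht] at hpopperm
      have h4 : ((minH.push ltMin x).popRest ltMin).toList.Perm
          ((insSorted sl x).drop (ys.length / 2 + 1)) :=
        ((hpermMin1.symm.trans hpopperm).symm.trans hdrop.symm).cons_inv
      have h3 : (maxH.push ltMax ((minH.push ltMin x).top)).toList.Perm
          ((insSorted sl x).take (ys.length / 2 + 1)) := by
        rw [ht]
        exact ((SkHeap.toList_push_perm ltMax maxH _).trans (hmaxp.cons _)).trans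
          (ins_take_ge_perm sl x (ys.length / 2) (by omega) (by omega)).symm
      have h5 : (maxH.push ltMax ((minH.push ltMin x).top)).IsHeap ltMax :=
        SkHeap.isHeap_push ltMax ltMax_asym ltMax_trans _ _ hmaxH
      have htopnew : (maxH.push ltMax ((minH.push ltMin x).top)).top =
          (insSorted sl x).getD (ys.length / 2) 0 := hmed_top _ h5 h3
      have hval : res.sum + (x - (maxH.push ltMax ((minH.push ltMin x).top)).top) =
          costFold (insSorted sl x) ((insSorted sl x).getD (ys.length / 2) 0) := by
        rw [costFold_eq_sum, htopnew]
        omega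
      obtain ⟨c8, c9, c10, c11⟩ := tail_components _ _ _ _ _ hfin hresne hlast hval
      refine invAB_build (ys ++ [x]) _ _ _ _ _ _ (hstA.trans hA') hB' hs'
        (by rw [hlen', hxlen]) ?_ ?_ h5 ?_ ?_ ?_ c9 c10 c11
      · rw [hxlen, Nat.add_sub_cancel]
        exact h3
      · rw [hxlen, Nat.add_sub_cancel]
        exact h4
      · exact SkHeap.isHeap_popRest ltMin ltMin_asym ltMin_trans _ hminPushHeap
      · rw [hxlen, Nat.add_sub_cancel, List.getLastD_concat]
        exact htopnew
      · rw [hxlen, Nat.add_sub_cancel]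
        exact c8
    · -- odd length: push onto the min-heap (A's branch 5)
      have huK : ys.length / 2 = (ys.length - 1) / 2 := by omega
      have hc2' : ¬(minH.size = maxH.size ∧ x ≤ maxH.top) := by
        rintro ⟨a, -⟩; omega
      have hc3' : ¬(minH.size = maxH.size ∧ maxH.top < x) := by
        rintro ⟨a, -⟩; omega
      have hc4' : ¬(minH.size + 1 = maxH.size ∧ x ≤ maxH.top) := by
        rintro ⟨-, b⟩
        rw [htopmax] at b
        omega
      have hc5 : minH.size + 1 = maxH.size ∧ maxH.top < x := ⟨by omega, by rw [htopmax]; omega⟩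
      have hA' : stepA (med, minH, maxH, res) x =
          (med ++ [maxH.top], minH.push ltMin x, maxH, res ++ [x - med.getLastD 0]) := by
        simp only [stepA]
        rw [if_neg hc0, if_neg hc2', if_neg hc3', if_neg hc4', if_pos hc5]
      have hmm' : (insSorted sl x).getD (ys.length / 2) 0 = sl.getD ((ys.length - 1) / 2) 0 := by
        rw [huK, insSorted_getD sl x ((ys.length - 1) / 2) (by omega), if_pos (by omega)]
      have h3 : maxH.toList.Perm ((insSorted sl x).take (ys.length / 2 + 1)) := by
        rw [huK, ins_take_ge sl x ((ys.length - 1) / 2 + 1) (by omega)]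
        exact hmaxp
      have h4 : (minH.push ltMin x).toList.Perm ((insSorted sl x).drop (ys.length / 2 + 1)) := by
        have h1 := ins_drop_ge_perm sl x ((ys.length - 1) / 2) (by omega) (by omega)
        have h2 : (insSorted sl x).getD ((ys.length - 1) / 2) 0 = sl.getD ((ys.length - 1) / 2) 0 := by
          rw [insSorted_getD sl x ((ys.length - 1) / 2) (by omega), if_pos (by omega)]
        rw [h2, drop_getD_cons sl ((ys.length - 1) / 2) (by omega)] at h1
        have h6 := (h1.trans (List.Perm.swap _ _ _)).cons_inv
        rw [huK]
        exact ((SkHeap.toList_push_perm ltMin minH x).trans (hminp.cons x)).trans h6.symm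
      have hval : res.sum + (x - med.getLastD 0) =
          costFold (insSorted sl x) ((insSorted sl x).getD (ys.length / 2) 0) := by
        rw [hmm'] at hcost habs
        rw [costFold_eq_sum, hmm', hmed]
        omega
      obtain ⟨c8, c9, c10, c11⟩ := tail_components _ _ _ _ _ hfin hresne hlast hval
      refine invAB_build (ys ++ [x]) _ _ _ _ _ _ (hstA.trans hA') hB' hs'
        (by rw [hlen', hxlen]) ?_ ?_ hmaxH ?_ ?_ ?_ c9 c10 c11
      · rw [hxlen, Nat.add_sub_cancel]
        exact h3
      · rw [hxlen, Nat.add_sub_cancel]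
        exact h4
      · exact SkHeap.isHeap_push ltMin ltMin_asym ltMin_trans _ _ hminH
      · rw [hxlen, Nat.add_sub_cancel, List.getLastD_concat, htopmax, hmm']
      · rw [hxlen, Nat.add_sub_cancel]
        exact c8

theorem invAB_holds (xs : List Int) (hne : xs ≠ []) : InvAB xs := by
  induction xs using List.reverseRecOn with
  | nil => exact absurd rfl hne
  | append_singleton ys x IH =>
      by_cases hys : ys = []
      · subst hys
        simpa using invAB_single x
      · exact invAB_step ys x hys (IH hys)

theorem numsGame_eq_finish (nums : List Int) :
    numsGame nums =
      finishRes ((stateA ((PySem.List.enumerate nums).map (fun p => p.2 - p.1))).2.2.2) := by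
  have h0 : numsGame nums =
      (match (stateA ((PySem.List.enumerate nums).map (fun p => p.2 - p.1))).2.2.2 with
        | [] => ([] : List Int)
        | r0 :: rs => r0 :: accumMod r0 rs) := rfl
  rw [h0]
  rcases (stateA ((PySem.List.enumerate nums).map (fun p => p.2 - p.1))).2.2.2 with _ | ⟨r0, rs⟩ <;>
    simp [finishRes]


-- ===== VERDICT (by name: the statement is the Claim_ definition above) =====
theorem numsGame_spec : Claim_equal_numsGame := by
  unfold Claim_equal_numsGame Spec_numsGame
  intro nums _
  have hBeq : numsGame_alt nums =
      (stateB ((PySem.List.enumerate nums).map (fun p => p.2 - p.1))).2 := rfl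
  rw [numsGame_eq_finish, hBeq]
  by_cases hne : (PySem.List.enumerate nums).map (fun p => p.2 - p.1) = []
  · rw [hne]
    simp [stateA, stateB, finishRes]
  · exact (invAB_holds _ hne).2.2.2.2.2.2.2.2.1
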